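-- pv_equiv track=rewrite | github.com/IamGauravS/Data-Structures-And-Algorithms | google-prep-450/stack-and-queue.py/prefix-to-infix.py | checkIfValidPrefix
-- ===== SOURCE A (Python) =====
-- def checkIfValidPrefix(s):
--
--     stack = 0  # Stack count (acts like a stack size indicator)
--
--     # Traverse from right to left
--     for ch in reversed(s):
--         if ch.isalnum():  # If it's an operand, increase stack size
--             stack += 1
--         else:  # If it's an operator
--             if stack < 2:  # Not enough operands to apply the operator
--                 return False
--             stack -= 1  # Applying the operator reduces the stack by one
--
--     return stack == 1  # At the end, only one valid expression should remain in the stack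
-- ===== SOURCE B (Python) =====
-- def checkIfValidPrefix(s):
--     # Two staged passes: build the list of prefix sums of weights
--     # (+1 for an operator, -1 for an operand), then check in bulk that the
--     # total comes to -1 and no proper prefix ever dips below 0.
--     if not s:
--         return False
--     sums = []
--     t = 0
--     for ch in s:
--         t += -1 if ch.isalnum() else 1
--         sums.append(t)
--     return sums[-1] == -1 and all(v >= 0 for v in sums[:-1])
-- ===== Notes on version B (the rewrite author's own statement) =====
-- stated objective: alternative
-- what changed: Replaced A's right-to-left operand-counting loop with early return by a staged left-to-right formulation: first build the list of prefix sums of weights (+1 per operator, -1 per operand), then check in bulk that the total is -1 and that no proper prefix sum is negative.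
import Mathlib
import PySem

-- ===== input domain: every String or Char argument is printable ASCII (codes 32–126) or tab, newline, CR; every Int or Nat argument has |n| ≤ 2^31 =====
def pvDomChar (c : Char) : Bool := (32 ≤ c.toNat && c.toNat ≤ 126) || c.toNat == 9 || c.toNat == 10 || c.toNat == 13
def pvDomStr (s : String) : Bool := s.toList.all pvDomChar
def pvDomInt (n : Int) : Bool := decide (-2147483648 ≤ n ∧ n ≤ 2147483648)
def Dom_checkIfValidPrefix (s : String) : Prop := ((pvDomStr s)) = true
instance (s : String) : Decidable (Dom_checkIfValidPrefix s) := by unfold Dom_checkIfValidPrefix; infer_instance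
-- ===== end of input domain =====

-- B replaces A's right-to-left operand-counting loop with early return by two staged
-- passes: build the prefix sums of weights (+1 operator, -1 operand), then check in
-- bulk that the total is -1 and no proper prefix sum is negative (objective: alternative).

-- ===== PORT A =====
-- A's loop state: `some stack` while running, `none` after the early `return False`.
def pvStepA (st : Option Nat) (c : Char) : Option Nat :=
  match st with
  | none => none
  | some stack =>
    if PySem.Chars.isalnum c then some (stack + 1)
    else if stack < 2 then none
    else some (stack - 1)

def checkIfValidPrefix (s : String) : Bool :=
  s.toList.reverse.foldl pvStepA (some 0) == some 1

-- ===== PORT B =====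
-- the `for` loop of Source B building `sums`, carrying the running total `t`
def pvSums (t : Int) : List Char → List Int
  | [] => []
  | c :: rest =>
    let t' := t + (if PySem.Chars.isalnum c then (-1 : Int) else 1)
    t' :: pvSums t' rest

def checkIfValidPrefix_alt (s : String) : Bool :=
  let l := s.toList
  if l.isEmpty then false
  else
    let sums := pvSums 0 l
    sums.getLastD 0 == -1 && sums.dropLast.all (fun v => decide (0 ≤ v))

-- ===== PRECONDITION & SPEC =====
def Spec_checkIfValidPrefix (s : String) (out : Bool) : Prop := out = checkIfValidPrefix_alt s
instance (s : String) (out : Bool) : Decidable (Spec_checkIfValidPrefix s out) := by unfold Spec_checkIfValidPrefix; infer_instance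

-- ===== CLAIM (what is proved, stated in full; the proofs are below) =====
def Claim_equal_checkIfValidPrefix : Prop := ∀ (s : String), Dom_checkIfValidPrefix s → Spec_checkIfValidPrefix s (checkIfValidPrefix s)

-- ===== LEMMAS AND PROOFS =====

-- Proof-only intermediate machine: "how many prefix expressions are still needed",
-- reading left-to-right; `none` once the count hits 0 with input remaining.
def pvStepB (st : Option Nat) (c : Char) : Option Nat :=
  match st with
  | none => none
  | some need =>
    if need = 0 then none
    else if PySem.Chars.isalnum c then some (need - 1)
    else some (need + 1)

theorem pvStepB_none (l : List Char) : l.foldl pvStepB none = none := by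
  induction l with
  | nil => rfl
  | cons c t ih => simpa [pvStepB] using ih

-- A's stack after scanning l right-to-left never ends at 0 unless l is empty.
theorem pvA_ne_zero (c : Char) (t : List Char) :
    (c :: t).foldr (fun x y => pvStepA y x) (some 0) ≠ some 0 := by
  simp only [List.foldr]
  cases h : t.foldr (fun x y => pvStepA y x) (some 0) with
  | none => simp [pvStepA]
  | some k =>
    simp only [pvStepA]
    split_ifs <;> simp
    omega

-- A's right-to-left scan of l ends (without failing) with exactly n operand groups
-- iff the need-counter machine starting at n consumes l exactly.
theorem pvAB (l : List Char) (n : Nat) :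
    (l.foldl pvStepB (some n) = some 0) ↔
      (l.foldr (fun x y => pvStepA y x) (some 0) = some n) := by
  induction l generalizing n with
  | nil => simp [eq_comm]
  | cons c t ih =>
    by_cases hn : n = 0
    · subst hn
      have h1 : pvStepB (some 0) c = none := by simp [pvStepB]
      rw [List.foldl_cons, h1, pvStepB_none]
      exact iff_of_false (by simp) (pvA_ne_zero c t)
    · simp only [List.foldl, List.foldr, pvStepB, if_neg hn]
      by_cases ha : PySem.Chars.isalnum c
      · rw [if_pos ha, ih]
        cases h : t.foldr (fun x y => pvStepA y x) (some 0) with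
        | none => simp [pvStepA]
        | some k =>
          simp only [pvStepA, if_pos ha, Option.some_inj]
          omega
      · rw [if_neg ha, ih]
        cases h : t.foldr (fun x y => pvStepA y x) (some 0) with
        | none => simp [pvStepA]
        | some k =>
          simp only [pvStepA, if_neg ha]
          split_ifs with hk
          · exact iff_of_false (fun h => absurd (Option.some.inj h) (by omega)) (by simp)
          · simp only [Option.some_inj]; omega

theorem pvSums_ne_nil (t : Int) (c : Char) (l : List Char) : pvSums t (c :: l) ≠ [] := by
  simp [pvSums]

-- The need-counter machine succeeds iff the running sums pvSums n l end at 0 and all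
-- intermediate states (n and every sum but the last) stay ≥ 1.
theorem pvBC (l : List Char) (n : Nat) :
    (l.foldl pvStepB (some n) = some 0) ↔
      ((pvSums (n : Int) l).getLastD (n : Int) = 0 ∧
        ∀ x ∈ (((n : Int)) :: pvSums (n : Int) l).dropLast, 1 ≤ x) := by
  induction l generalizing n with
  | nil => simp [pvSums]
  | cons c t ih =>
    by_cases hn : n = 0
    · subst hn
      have h1 : pvStepB (some 0) c = none := by simp [pvStepB]
      rw [List.foldl_cons, h1, pvStepB_none]
      apply iff_of_false (by simp)
      rintro ⟨-, hall⟩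
      have : (1 : Int) ≤ 0 := hall 0 (by
        rw [List.dropLast_cons_of_ne_nil (pvSums_ne_nil _ _ _)]
        exact List.mem_cons_self)
      omega
    · -- n ≥ 1 : one step of the machine matches the head of pvSums
      have hstep : pvStepB (some n) c =
          some (if PySem.Chars.isalnum c then n - 1 else n + 1) := by
        simp [pvStepB, hn]; split_ifs <;> rfl
      set m : Nat := if PySem.Chars.isalnum c then n - 1 else n + 1 with hm
      have hcast : ((m : Int)) = (n : Int) + (if PySem.Chars.isalnum c then (-1 : Int) else 1) := by
        rw [hm]; split_ifs <;> omega
      rw [List.foldl_cons, hstep, ih m]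
      show _ ↔ ((pvSums (n:Int) (c::t)).getLastD _ = 0 ∧ _)
      simp only [pvSums, ← hcast]
      constructor
      · rintro ⟨hlast, hall⟩
        refine ⟨?_, ?_⟩
        · rw [List.getLastD_cons]
          cases t with
          | nil => simpa [pvSums] using hlast
          | cons d u => simpa [List.getLastD] using hlast
        · intro x hx
          rw [List.dropLast_cons_of_ne_nil (by simp)] at hx
          rcases List.mem_cons.mp hx with h | h
          · subst h; omega
          · exact hall x h
      · rintro ⟨hlast, hall⟩
        refine ⟨?_, ?_⟩
        · rw [List.getLastD_cons] at hlast
          cases t with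
          | nil => simpa [pvSums] using hlast
          | cons d u => simpa [List.getLastD] using hlast
        · intro x hx
          apply hall
          rw [List.dropLast_cons_of_ne_nil (by simp)]
          exact List.mem_cons_of_mem _ hx

-- Shifting the running total shifts every element of pvSums.
theorem pvSums_shift (l : List Char) (a t : Int) :
    pvSums (a + t) l = (pvSums t l).map (fun x => a + x) := by
  induction l generalizing t with
  | nil => simp [pvSums]
  | cons c u ih =>
    simp only [pvSums]
    rw [show a + t + (if PySem.Chars.isalnum c then (-1:Int) else 1)
          = a + (t + (if PySem.Chars.isalnum c then (-1:Int) else 1)) by ring, ih,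
       List.map_cons]

-- ===== VERDICT (by name: the statement is the Claim_ definition above) =====
theorem checkIfValidPrefix_spec : Claim_equal_checkIfValidPrefix := by
  intro s _
  unfold Spec_checkIfValidPrefix checkIfValidPrefix checkIfValidPrefix_alt
  rw [List.foldl_reverse]
  cases hl : s.toList with
  | nil => simp
  | cons c t =>
    rw [if_neg (by simp)]
    rw [Bool.eq_iff_iff]
    simp only [beq_iff_eq, Bool.and_eq_true, List.all_eq_true, decide_eq_true_eq]
    rw [← pvAB, pvBC]
    have hshift : pvSums ((1:Nat) : Int) (c :: t) = (pvSums 0 (c :: t)).map (fun x => 1 + x) := by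
      simpa using pvSums_shift (c :: t) 1 0
    rw [hshift]
    constructor
    · rintro ⟨hlast, hall⟩
      refine ⟨?_, ?_⟩
      · rcases List.exists_cons_of_ne_nil (pvSums_ne_nil 0 c t) with ⟨y, ys, hy⟩
        rw [hy] at hlast ⊢
        rw [List.map_cons, List.getLastD_cons, List.getLastD_map] at hlast
        rw [List.getLastD_cons]
        omega
      · intro x hx
        have := hall (1 + x) (by
          rw [List.dropLast_cons_of_ne_nil (by simp [pvSums_ne_nil])]
          refine List.mem_cons_of_mem _ ?_
          rw [← List.map_dropLast]
          exact List.mem_map_of_mem hx)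
        omega
    · rintro ⟨hlast, hall⟩
      refine ⟨?_, ?_⟩
      · rcases List.exists_cons_of_ne_nil (pvSums_ne_nil 0 c t) with ⟨y, ys, hy⟩
        rw [hy] at hlast ⊢
        rw [List.map_cons, List.getLastD_cons, List.getLastD_map]
        rw [List.getLastD_cons] at hlast
        omega
      · intro x hx
        rw [List.dropLast_cons_of_ne_nil (by simp [pvSums_ne_nil])] at hx
        rcases List.mem_cons.mp hx with h | h
        · subst h; norm_num
        · rw [← List.map_dropLast] at h
          rcases List.mem_map.mp h with ⟨y, hy, rfl⟩
          have := hall y hy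
          omega
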